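-- pv_equiv track=rewrite | github.com/barry4356/rpg_helpers_python | common/hexmath.py | layer_min_max
-- ===== SOURCE A (Python) =====
-- def layer_min_max(layer):
--     layer_min = 0
--     layer_max = 1
--     layer_size = 0
--     for i in range(layer-1):
--         layer_size = layer_size + 6
--         layer_min = layer_max + 1
--         layer_max = layer_min + layer_size - 1
--     return(layer_min,layer_max)
-- ===== SOURCE B (Python) =====
-- def layer_min_max(layer):
--     n = layer - 1
--     if n <= 0:
--         return (0, 1)
--     layer_max = 1 + 3 * n * (n + 1)
--     return (layer_max - 6 * n + 1, layer_max)
-- ===== Notes on version B (the rewrite author's own statement) =====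
-- stated objective: faster
-- what changed: Replaced the O(layer) accumulation loop over range(layer-1) by the closed-form arithmetic of hex-ring indices (max = 1+3n(n+1), min = max-6n+1 with n = layer-1).
import Mathlib
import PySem

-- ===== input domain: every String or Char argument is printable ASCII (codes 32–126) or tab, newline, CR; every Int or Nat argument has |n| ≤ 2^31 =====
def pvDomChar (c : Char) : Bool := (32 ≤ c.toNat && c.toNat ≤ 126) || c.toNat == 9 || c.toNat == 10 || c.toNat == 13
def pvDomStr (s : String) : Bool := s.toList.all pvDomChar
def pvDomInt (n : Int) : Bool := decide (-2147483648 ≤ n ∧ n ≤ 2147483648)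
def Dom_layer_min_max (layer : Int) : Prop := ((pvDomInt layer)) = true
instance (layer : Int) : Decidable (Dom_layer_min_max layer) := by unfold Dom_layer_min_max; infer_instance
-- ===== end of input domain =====

-- B replaces A's O(layer) accumulation loop by the closed-form hex-ring arithmetic (O(1)).


-- ===== PORT A =====
-- state is (layer_min, layer_max, layer_size), loop is 'for i in range(layer-1)'
def pvStepA (st : Int × Int × Int) (_i : Int) : Int × Int × Int :=
  let layer_size := st.2.2 + 6
  let layer_min := st.2.1 + 1
  let layer_max := layer_min + layer_size - 1
  (layer_min, layer_max, layer_size)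

def layer_min_max (layer : Int) : Int × Int :=
  let s := (PySem.List.pyRange 0 (layer - 1) 1).foldl pvStepA (0, 1, 0)
  (s.1, s.2.1)

-- ===== PORT B =====
def layer_min_max_alt (layer : Int) : Int × Int :=
  let n := layer - 1
  if n ≤ 0 then (0, 1)
  else
    let layer_max := 1 + 3 * n * (n + 1)
    (layer_max - 6 * n + 1, layer_max)

-- ===== PRECONDITION & SPEC =====
def Spec_layer_min_max (layer : Int) (out : Int × Int) : Prop := out = layer_min_max_alt layer
instance (layer : Int) (out : Int × Int) : Decidable (Spec_layer_min_max layer out) := by unfold Spec_layer_min_max; infer_instance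

-- ===== CLAIM (what is proved, stated in full; the proofs are below) =====
def Claim_equal_layer_min_max : Prop := ∀ (layer : Int), Dom_layer_min_max layer → Spec_layer_min_max layer (layer_min_max layer)

-- ===== LEMMAS AND PROOFS =====
theorem pvLoopA (n : Nat) :
    (PySem.List.pyRange 0 (n : Int) 1).foldl pvStepA (0, 1, 0) =
      if n = 0 then (0, 1, 0)
      else (3 * (n : Int) * ((n : Int) - 1) + 2, 1 + 3 * (n : Int) * ((n : Int) + 1), 6 * (n : Int)) := by
  induction n with
  | zero => simp [PySem.List.pyRange_one_eq_nil]
  | succ m ih =>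
      have h : PySem.List.pyRange 0 ((m : Int) + 1) 1 =
          PySem.List.pyRange 0 (m : Int) 1 ++ [(m : Int)] := by
        exact PySem.List.pyRange_one_succ_right (by exact_mod_cast Int.natCast_nonneg m)
      push_cast
      rw [h, List.foldl_append, ih]
      by_cases hm : m = 0
      · subst hm; simp [pvStepA]
      · simp only [hm, if_false]
        simp only [List.foldl, pvStepA]
        refine Prod.ext ?_ (Prod.ext ?_ ?_) <;> simp <;> ring

theorem layer_min_max_spec : Claim_equal_layer_min_max := by
  intro layer _
  unfold Spec_layer_min_max layer_min_max layer_min_max_alt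
  by_cases h : layer - 1 ≤ 0
  · rw [PySem.List.pyRange_one_eq_nil h]
    simp [h]
  · push Not at h
    set n : Nat := (layer - 1).toNat with hn
    have hcast : ((n : Int)) = layer - 1 := by
      rw [hn]; exact Int.toNat_of_nonneg (by omega)
    have hne : n ≠ 0 := by omega
    rw [← hcast, pvLoopA n, if_neg hne]
    have h' : ¬ ((n : Int) ≤ 0) := by omega
    simp only [h', if_false]
    refine Prod.ext ?_ ?_ <;> simp <;> ring

-- ===== VERDICT (by name: the statement is the Claim_ definition above) =====
-- (verdict theorem layer_min_max_spec is stated above by the Claim_ name)
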